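-- pv_equiv track=rewrite | github.com/leixiaohui-1974/chs-books-v2 | books/fix_orphan_images.py | find_insert_position_concept
-- ===== SOURCE A (Python) =====
-- def find_insert_position_concept(lines: list) -> int:
--     for i, line in enumerate(lines):
--         if line.startswith("## "):
--             for j in range(i + 1, len(lines)):
--                 if lines[j].strip() == "":
--                     return j
--             return i + 1
--     return 1
-- ===== SOURCE B (Python) =====
-- def find_insert_position_concept(lines: list) -> int:
--     # Backward pass (right fold): nb = index of the first blank line in the
--     # suffix strictly after the current position; res = answer for the suffix.
--     nb = None
--     res = 1
--     for i in range(len(lines) - 1, -1, -1):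
--         line = lines[i]
--         if line.startswith("## "):
--             res = nb if nb is not None else i + 1
--         if line.strip() == "":
--             nb = i
--     return res
-- ===== Notes on version B (the rewrite author's own statement) =====
-- stated objective: alternative
-- what changed: Replaces A's forward scan with a nested inner scan by a single backward (right-fold) pass that maintains the index of the nearest blank line in the suffix and the answer for the suffix, so the final accumulator is the answer.
import Mathlib
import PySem

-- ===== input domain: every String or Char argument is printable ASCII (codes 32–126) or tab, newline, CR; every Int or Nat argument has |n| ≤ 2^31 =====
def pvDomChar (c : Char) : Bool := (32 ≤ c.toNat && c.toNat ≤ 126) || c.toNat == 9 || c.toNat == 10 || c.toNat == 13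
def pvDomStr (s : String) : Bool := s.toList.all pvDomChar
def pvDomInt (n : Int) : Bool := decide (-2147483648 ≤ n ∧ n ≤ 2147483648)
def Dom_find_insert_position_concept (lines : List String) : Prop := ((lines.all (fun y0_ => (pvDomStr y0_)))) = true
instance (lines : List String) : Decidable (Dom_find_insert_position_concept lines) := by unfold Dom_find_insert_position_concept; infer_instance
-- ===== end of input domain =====

-- B replaces A's forward scan with nested inner scan by one backward (right-fold)
-- pass with accumulator (nearest blank index in the suffix, answer for the suffix);
-- objective: alternative decomposition.

-- ===== PORT A =====
-- inner loop: for j in range(i+1, len(lines)): if lines[j].strip() == "": return j; then return i+1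
def pvInnerA (lines : List String) (i : Nat) (j : Nat) : Int :=
  if h : j < lines.length then
    if PySem.Str.strip lines[j] = "" then (j : Int)
    else pvInnerA lines i (j + 1)
  else (i : Int) + 1
termination_by lines.length - j

-- outer loop over enumerate(lines), carried as current index + remaining suffix
def pvOuterA (lines : List String) : Nat → List String → Int
  | _, [] => 1
  | i, line :: rest =>
    if PySem.Str.startswith line "## " then pvInnerA lines i (i + 1)
    else pvOuterA lines (i + 1) rest

def find_insert_position_concept (lines : List String) : Int :=
  pvOuterA lines 0 lines

-- ===== PORT B =====
-- pvB i suffix = (index of first blank line in suffix, answer for suffix starting at i)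
-- (the structural recursion is Source B's backward loop: each step is one iteration)
def pvB : Nat → List String → Option Nat × Int
  | _, [] => (none, 1)
  | i, line :: rest =>
    let p := pvB (i + 1) rest
    ((if PySem.Str.strip line = "" then some i else p.1),
     (if PySem.Str.startswith line "## " then
        (match p.1 with | some j => (j : Int) | none => (i : Int) + 1)
      else p.2))

def find_insert_position_concept_alt (lines : List String) : Int :=
  (pvB 0 lines).2

-- ===== PRECONDITION & SPEC =====
def Spec_find_insert_position_concept (lines : List String) (out : Int) : Prop := out = find_insert_position_concept_alt lines
instance (lines : List String) (out : Int) : Decidable (Spec_find_insert_position_concept lines out) := by unfold Spec_find_insert_position_concept; infer_instance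

-- ===== CLAIM (what is proved, stated in full; the proofs are below) =====
def Claim_equal_find_insert_position_concept : Prop := ∀ (lines : List String), Dom_find_insert_position_concept lines → Spec_find_insert_position_concept lines (find_insert_position_concept lines)

-- ===== LEMMAS AND PROOFS =====

lemma drop_cons_tail (lines : List String) (i : Nat) (line : String) (tail : List String)
    (hdrop : line :: tail = lines.drop i) : tail = lines.drop (i + 1) := by
  have hlt : i < lines.length := by
    by_contra hge
    rw [Nat.not_lt] at hge
    rw [List.drop_eq_nil_of_le hge] at hdrop
    exact List.cons_ne_nil _ _ hdrop
  have := List.drop_eq_getElem_cons hlt (l := lines)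
  rw [this] at hdrop
  exact (List.cons.injEq _ _ _ _ ▸ hdrop).2

lemma inner_eq (lines : List String) (i : Nat) :
    ∀ j, pvInnerA lines i j =
      (match (pvB j (lines.drop j)).1 with | some k => (k : Int) | none => (i : Int) + 1) := by
  intro j
  induction' hn : lines.length - j using Nat.strong_induction_on with n ih generalizing j
  by_cases h : j < lines.length
  · have hdrop : lines.drop j = lines[j] :: lines.drop (j + 1) :=
      List.drop_eq_getElem_cons h
    rw [pvInnerA, dif_pos h, hdrop]
    by_cases hs : PySem.Str.strip lines[j] = ""
    · simp [pvB, hs]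
    · simp only [pvB, hs, if_false]
      exact ih (lines.length - (j + 1)) (by omega) (j + 1) rfl
  · have hdrop : lines.drop j = [] := List.drop_eq_nil_of_le (by omega)
    rw [pvInnerA, dif_neg h, hdrop]
    simp [pvB]

lemma outer_eq (lines : List String) :
    ∀ rest i, rest = lines.drop i → pvOuterA lines i rest = (pvB i rest).2 := by
  intro rest
  induction rest with
  | nil => intro i _; simp [pvOuterA, pvB]
  | cons line tail ih =>
    intro i hdrop
    have htail : tail = lines.drop (i + 1) := drop_cons_tail lines i line tail hdrop
    by_cases hs : PySem.Str.startswith line "## "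
    · simp only [pvOuterA, pvB, hs, if_pos]
      rw [inner_eq lines i (i + 1), ← htail]
    · simp only [pvOuterA, pvB, hs]
      exact ih (i + 1) htail

-- ===== VERDICT (by name: the statement is the Claim_ definition above) =====
theorem find_insert_position_concept_spec : Claim_equal_find_insert_position_concept := by
  intro lines _
  unfold Spec_find_insert_position_concept find_insert_position_concept find_insert_position_concept_alt
  exact outer_eq lines lines 0 (by simp)
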